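-- pv_equiv track=rewrite | github.com/guangxush/Math-Model-2018 | result2_code/src/data_process.py | update_city_value
-- ===== SOURCE A (Python) =====
-- def update_city_value(symmetry_array, key):
--     i = 0
--     for symmetry_array_sub in symmetry_array:
--         j = 0
--         for items in symmetry_array_sub:
--             if i == key or j == key:
--                 symmetry_array[i][j] = 999999
--             j += 1
--         i += 1
--     # print_dim2_array(symmetry_array)
--     return symmetry_array
-- ===== SOURCE B (Python) =====
-- def update_city_value(symmetry_array, key):
--     # Touch only row `key` and column `key` instead of scanning every cell.
--     for i, row in enumerate(symmetry_array):
--         if i == key: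
--             symmetry_array[i] = [999999] * len(row)
--         elif 0 <= key < len(row):
--             row[key] = 999999
--     return symmetry_array
-- ===== Notes on version B (the rewrite author's own statement) =====
-- stated objective: faster
-- what changed: Instead of scanning every cell with nested loops, B touches only the affected entries: it replaces row `key` wholesale and writes the single element at column `key` in every other row.
import Mathlib
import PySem

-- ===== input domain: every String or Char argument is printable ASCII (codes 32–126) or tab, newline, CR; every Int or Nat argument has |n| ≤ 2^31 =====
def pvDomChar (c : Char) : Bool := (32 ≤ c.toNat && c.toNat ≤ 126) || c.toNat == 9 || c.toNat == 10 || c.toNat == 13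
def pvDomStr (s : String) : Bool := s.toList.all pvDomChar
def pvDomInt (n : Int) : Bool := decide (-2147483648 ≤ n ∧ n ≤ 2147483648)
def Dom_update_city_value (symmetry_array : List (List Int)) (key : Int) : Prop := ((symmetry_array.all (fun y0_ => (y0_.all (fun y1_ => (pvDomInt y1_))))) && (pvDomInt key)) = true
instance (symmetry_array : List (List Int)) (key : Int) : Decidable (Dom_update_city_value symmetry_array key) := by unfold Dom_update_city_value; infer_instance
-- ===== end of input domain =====

-- B touches only row `key` and column `key` instead of scanning every cell (asymptotically faster);
-- equivalence is about the RETURN value only (both Pythons mutate their argument in place).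


-- ===== PORT A =====
-- inner loop: for items in row, with running j, write 999999 where i == key or j == key
def pvA_row (row : List Int) (i key j : Int) : List Int :=
  match row with
  | [] => []
  | x :: xs => (if i = key ∨ j = key then 999999 else x) :: pvA_row xs i key (j + 1)

-- outer loop: running i over the rows
def pvA_rows (rows : List (List Int)) (key i : Int) : List (List Int) :=
  match rows with
  | [] => []
  | r :: rs => pvA_row r i key 0 :: pvA_rows rs key (i + 1)

def update_city_value (symmetry_array : List (List Int)) (key : Int) : List (List Int) :=
  pvA_rows symmetry_array key 0

-- ===== PORT B =====
-- enumerate(rows): replace row `key` wholesale; in other rows set only element `key` if in range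
def pvB_rows (rows : List (List Int)) (key i : Int) : List (List Int) :=
  match rows with
  | [] => []
  | r :: rs =>
      (if i = key then List.replicate r.length 999999
       else if 0 ≤ key ∧ key < (r.length : Int) then r.set key.toNat 999999 else r)
        :: pvB_rows rs key (i + 1)

def update_city_value_alt (symmetry_array : List (List Int)) (key : Int) : List (List Int) :=
  pvB_rows symmetry_array key 0

-- ===== PRECONDITION & SPEC =====
def Spec_update_city_value (symmetry_array : List (List Int)) (key : Int) (out : List (List Int)) : Prop := out = update_city_value_alt symmetry_array key
instance (symmetry_array : List (List Int)) (key : Int) (out : List (List Int)) : Decidable (Spec_update_city_value symmetry_array key out) := by unfold Spec_update_city_value; infer_instance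

-- ===== CLAIM (what is proved, stated in full; the proofs are below) =====
def Claim_equal_update_city_value : Prop := ∀ (symmetry_array : List (List Int)) (key : Int), Dom_update_city_value symmetry_array key → Spec_update_city_value symmetry_array key (update_city_value symmetry_array key)

-- ===== LEMMAS AND PROOFS =====

theorem pvA_row_hit (row : List Int) (i key j : Int) (h : i = key) :
    pvA_row row i key j = List.replicate row.length 999999 := by
  subst h
  induction row generalizing j with
  | nil => simp [pvA_row]
  | cons x xs ih => simp [pvA_row, List.replicate_succ, ih]

theorem pvA_row_past (row : List Int) (i key j : Int) (hi : i ≠ key) (hj : key < j) :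
    pvA_row row i key j = row := by
  induction row generalizing j with
  | nil => rfl
  | cons x xs ih =>
      have hcond : ¬ (i = key ∨ j = key) := by
        rintro (h | h); exact hi h; omega
      rw [pvA_row, ih (j + 1) (by omega)]
      simp [hcond]

theorem pvA_row_miss (row : List Int) (i key j : Int) (hi : i ≠ key) :
    pvA_row row i key j =
      (if j ≤ key ∧ key < j + (row.length : Int)
       then row.set (key - j).toNat 999999 else row) := by
  induction row generalizing j with
  | nil => simp [pvA_row]
  | cons x xs ih =>
      have hlen : ((x :: xs).length : Int) = (xs.length : Int) + 1 := by
        simp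
      by_cases hj : j = key
      · have hc : j ≤ key ∧ key < j + ((x :: xs).length : Int) := by rw [hlen]; omega
        rw [pvA_row, pvA_row_past xs i key (j + 1) hi (by omega), if_pos hc]
        have h0 : (key - j).toNat = 0 := by omega
        simp [hj]
      · rw [pvA_row, ih (j + 1)]
        simp only [hi, hj, or_self, if_false]
        by_cases hin : j + 1 ≤ key ∧ key < j + 1 + (xs.length : Int)
        · have hc : j ≤ key ∧ key < j + ((x :: xs).length : Int) := by rw [hlen]; omega
          have hnat : (key - j).toNat = (key - (j + 1)).toNat + 1 := by omega
          rw [if_pos hin, if_pos hc, hnat, List.set_cons_succ]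
        · have hc : ¬ (j ≤ key ∧ key < j + ((x :: xs).length : Int)) := by rw [hlen]; omega
          rw [if_neg hin, if_neg hc]

theorem pvAB_rows (rows : List (List Int)) (key i : Int) :
    pvA_rows rows key i = pvB_rows rows key i := by
  induction rows generalizing i with
  | nil => rfl
  | cons r rs ih =>
      rw [pvA_rows, pvB_rows, ih]
      by_cases hi : i = key
      · rw [pvA_row_hit r i key 0 hi, if_pos hi]
      · rw [pvA_row_miss r i key 0 hi, if_neg hi]
        simp only [zero_add, Int.sub_zero]

-- ===== VERDICT (by name: the statement is the Claim_ definition above) =====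
theorem update_city_value_spec : Claim_equal_update_city_value := by
  intro arr key _
  exact pvAB_rows arr key 0
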